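-- pv_equiv track=rewrite | github.com/algorithm-solving/algorithm-study | jjongs2/Silver/2512. 예산/예산.py | assign_budget
-- ===== SOURCE A (Python) =====
-- def assign_budget(requests, total_budget):
--     low, high = 1, max(requests)
--     if sum(requests) <= total_budget:
--         return high
--     while high - low > 1:
--         mid = (low + high) // 2
--         budget = sum(min(r, mid) for r in requests)
--         if budget > total_budget:
--             high = mid
--         else:
--             low = mid
--     return low
-- ===== SOURCE B (Python) =====
-- def assign_budget(requests, total_budget):
--     s = sorted(requests)
--     if sum(s) <= total_budget:
--         return s[-1]
--     prefix = 0
--     n = len(s)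
--     for i in range(n):
--         k = n - i
--         if prefix + k * s[i] > total_budget:
--             return max(1, (total_budget - prefix) // k)
--         prefix += s[i]
--     return 1  # unreachable: sum(s) > total_budget guarantees the loop returns
-- ===== Notes on version B (the rewrite author's own statement) =====
-- stated objective: faster
-- what changed: Replaced the binary search over cap values (each probe re-summing min(r,mid) over all requests) by sorting once and scanning prefix sums, computing the answer in the first infeasible segment by a closed-form floor division.
import Mathlib
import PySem

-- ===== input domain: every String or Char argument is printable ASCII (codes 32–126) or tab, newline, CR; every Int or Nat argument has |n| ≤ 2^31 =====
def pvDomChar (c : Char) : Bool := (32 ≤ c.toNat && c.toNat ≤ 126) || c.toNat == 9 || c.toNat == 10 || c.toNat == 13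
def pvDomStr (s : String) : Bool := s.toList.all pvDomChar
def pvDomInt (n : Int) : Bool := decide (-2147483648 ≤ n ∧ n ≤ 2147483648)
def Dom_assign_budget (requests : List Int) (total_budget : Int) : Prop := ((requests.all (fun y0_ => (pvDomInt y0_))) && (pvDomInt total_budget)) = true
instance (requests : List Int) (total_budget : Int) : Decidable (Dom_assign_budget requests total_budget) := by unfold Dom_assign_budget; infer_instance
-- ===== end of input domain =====

-- B replaces A's O(n log V) binary search (a full sum per probe) by sort + one prefix-sum
-- scan with a closed-form floor division for the answer.

-- ===== PORT A =====
-- sum(min(r, mid) for r in requests)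
def budgetAt (requests : List Int) (mid : Int) : Int :=
  (requests.map (fun r => min r mid)).sum

-- the 'while high - low > 1' loop of A
def assignLoop (requests : List Int) (total_budget low high : Int) : Int :=
  if _h : high - low > 1 then
    if budgetAt requests (PySem.Int.floordiv (low + high) 2) > total_budget then
      assignLoop requests total_budget low (PySem.Int.floordiv (low + high) 2)
    else
      assignLoop requests total_budget (PySem.Int.floordiv (low + high) 2) high
  else low
termination_by (high - low).toNat
decreasing_by
  · have hm : PySem.Int.floordiv (low + high) 2 = (low + high) / 2 :=
      PySem.Int.floordiv_eq_ediv_of_pos (by omega)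
    rw [hm]; omega
  · have hm : PySem.Int.floordiv (low + high) 2 = (low + high) / 2 :=
      PySem.Int.floordiv_eq_ediv_of_pos (by omega)
    rw [hm]; omega

def assign_budget (requests : List Int) (total_budget : Int) : Int :=
  -- max(requests): raises ValueError on [], excluded by Pre_
  let high := (PySem.List.max? requests (fun r => r)).getD 0
  if requests.sum ≤ total_budget then high
  else assignLoop requests total_budget 1 high

-- ===== PORT B =====
-- B's for-loop over the sorted list: pre = sum of the consumed prefix, the Int k of Source B
-- is the length of the remaining suffix
def altScan (total_budget pre : Int) : List Int → Int
  | [] => 1  -- Source B's trailing 'return 1' (unreachable when sum > total_budget)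
  | x :: rest =>
    if pre + ((x :: rest).length : Int) * x > total_budget then
      max 1 (PySem.Int.floordiv (total_budget - pre) ((x :: rest).length : Int))
    else altScan total_budget (pre + x) rest

def assign_budget_alt (requests : List Int) (total_budget : Int) : Int :=
  let s := PySem.List.sorted requests (fun r => r)
  if s.sum ≤ total_budget then (PySem.List.pyGet? s (-1)).getD 0  -- s[-1]: raises on [], excluded by Pre_
  else altScan total_budget 0 s

-- ===== PRECONDITION & SPEC =====
-- Pre_ excludes only the empty list, on which both A (max([])) and B (s[-1]) raise.
def Pre_assign_budget (requests : List Int) (total_budget : Int) : Prop := requests ≠ []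
instance (requests : List Int) (total_budget : Int) : Decidable (Pre_assign_budget requests total_budget) := by unfold Pre_assign_budget; infer_instance
def pvWitness_assign_budget : List Int × Int := ([3, 1, 4], 6)

def Spec_assign_budget (requests : List Int) (total_budget : Int) (out : Int) : Prop := out = assign_budget_alt requests total_budget
instance (requests : List Int) (total_budget : Int) (out : Int) : Decidable (Spec_assign_budget requests total_budget out) := by unfold Spec_assign_budget; infer_instance

-- ===== CLAIM (what is proved, stated in full; the proofs are below) =====
def Claim_equal_assign_budget : Prop := ∀ (requests : List Int) (total_budget : Int), Dom_assign_budget requests total_budget → Pre_assign_budget requests total_budget → Spec_assign_budget requests total_budget (assign_budget requests total_budget)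

-- ===== LEMMAS AND PROOFS =====

theorem budgetAt_mono (l : List Int) {c d : Int} (h : c ≤ d) : budgetAt l c ≤ budgetAt l d := by
  induction l with
  | nil => simp [budgetAt]
  | cons x t ih =>
    simp only [budgetAt, List.map_cons, List.sum_cons] at *
    exact add_le_add (min_le_min le_rfl h) ih

theorem budgetAt_eq_sum (l : List Int) {c : Int} (h : ∀ r ∈ l, r ≤ c) : budgetAt l c = l.sum := by
  induction l with
  | nil => simp [budgetAt]
  | cons x t ih =>
    simp only [budgetAt, List.map_cons, List.sum_cons] at *
    rw [min_eq_left (h x (by simp)), ih (fun r hr => h r (by simp [hr]))]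

theorem budgetAt_const (l : List Int) {c : Int} (h : ∀ r ∈ l, c ≤ r) :
    budgetAt l c = (l.length : Int) * c := by
  induction l with
  | nil => simp [budgetAt]
  | cons x t ih =>
    simp only [budgetAt, List.map_cons, List.sum_cons, List.length_cons] at *
    rw [min_eq_right (h x (by simp)), ih (fun r hr => h r (by simp [hr]))]
    push_cast; ring

theorem budgetAt_perm {l l' : List Int} (h : l.Perm l') (c : Int) : budgetAt l c = budgetAt l' c :=
  (h.map _).sum_eq

theorem budgetAt_append (a b : List Int) (c : Int) :
    budgetAt (a ++ b) c = budgetAt a c + budgetAt b c := by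
  simp [budgetAt]

-- the value both programs compute: ≥ 1, feasible (or 1), and one more is infeasible
def GoodCap (l : List Int) (T r : Int) : Prop :=
  1 ≤ r ∧ (r = 1 ∨ budgetAt l r ≤ T) ∧ T < budgetAt l (r + 1)

theorem goodCap_unique {l : List Int} {T r s : Int}
    (hr : GoodCap l T r) (hs : GoodCap l T s) : r = s := by
  obtain ⟨hr1, hr2, hr3⟩ := hr
  obtain ⟨hs1, hs2, hs3⟩ := hs
  by_contra hne
  rcases lt_or_gt_of_ne hne with h | h
  · rcases hs2 with h2 | h2
    · omega
    · exact absurd (le_trans (budgetAt_mono l (by omega)) h2) (not_le.mpr hr3)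
  · rcases hr2 with h2 | h2
    · omega
    · exact absurd (le_trans (budgetAt_mono l (by omega)) h2) (not_le.mpr hs3)

theorem loop_good (l : List Int) (T : Int) :
    ∀ (n : ℕ) (low high : Int), (high - low).toNat ≤ n → 1 ≤ low →
    (low = 1 ∨ budgetAt l low ≤ T) → (∀ c, high ≤ c → T < budgetAt l c) →
    GoodCap l T (assignLoop l T low high) := by
  intro n
  induction n with
  | zero =>
    intro low high hn h1 h2 hh
    rw [assignLoop, dif_neg (by omega)]
    exact ⟨h1, h2, hh (low + 1) (by omega)⟩
  | succ m ih =>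
    intro low high hn h1 h2 hh
    rw [assignLoop]
    split
    · rename_i hgt
      have hm : PySem.Int.floordiv (low + high) 2 = (low + high) / 2 :=
        PySem.Int.floordiv_eq_ediv_of_pos (by omega)
      have hb : low + 1 ≤ PySem.Int.floordiv (low + high) 2 ∧
          PySem.Int.floordiv (low + high) 2 ≤ high - 1 := by rw [hm]; omega
      split
      · rename_i hbig
        exact ih low _ (by omega) h1 h2
          (fun c hc => lt_of_lt_of_le hbig (budgetAt_mono l hc))
      · rename_i hsmall
        exact ih _ high (by omega) (by omega) (Or.inr (by omega)) hh
    · rename_i hstop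
      exact ⟨h1, h2, hh (low + 1) (by omega)⟩

theorem scan_good (T : Int) :
    ∀ (suf done : List Int), (done ++ suf).Pairwise (· ≤ ·) →
    (∀ y ∈ done, done.sum + (suf.length : Int) * y ≤ T) →
    done ++ suf ≠ [] → T < (done ++ suf).sum →
    GoodCap (done ++ suf) T (altScan T done.sum suf) := by
  intro suf
  induction suf with
  | nil =>
    intro done hs hinv hne htot
    exfalso
    rcases done with _ | ⟨y, t⟩
    · exact hne rfl
    · have := hinv y (by simp)
      simp only [List.append_nil, List.sum_cons] at htot
      simp only [List.length_nil, Nat.cast_zero, zero_mul, add_zero, List.sum_cons] at this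
      omega
  | cons x rest ih =>
    intro done hs hinv hne htot
    simp only [altScan]
    have hk : (0:Int) < ((x :: rest).length : Int) := by
      simp only [List.length_cons]; push_cast; omega
    have hdx : ∀ y ∈ done, y ≤ x := by
      intro y hy
      have := (List.pairwise_append.mp hs).2.2
      exact this y hy x (by simp)
    have hxr : ∀ z ∈ x :: rest, x ≤ z := by
      have hp : (x :: rest).Pairwise (· ≤ ·) := (List.pairwise_append.mp hs).2.1
      intro z hz
      rcases List.mem_cons.mp hz with rfl | hz
      · exact le_refl z
      · exact (List.pairwise_cons.mp hp).1 z hz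
    split
    · rename_i hgt
      set k : Int := ((x :: rest).length : Int) with hkdef
      set d : Int := PySem.Int.floordiv (T - done.sum) k with hd
      have hd1 : k * d ≤ T - done.sum := by
        have h := (PySem.Int.le_floordiv_iff_mul_le (a := T - done.sum) (q := d) hk).mp le_rfl
        linarith [mul_comm d k]
      have hd2 : T - done.sum < k * (d + 1) := by
        have h := (PySem.Int.floordiv_lt_iff_lt_mul (a := T - done.sum) (q := d + 1) hk).mp
          (by omega)
        linarith [mul_comm (d + 1) k]
      have hxd : d < x := by
        have h : k * d < k * x := by omega
        exact lt_of_mul_lt_mul_left h (le_of_lt hk)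
      have hdoned : ∀ y ∈ done, y ≤ d := by
        intro y hy
        have h1 := hinv y hy
        have h2 : k * y < k * (d + 1) := by omega
        have := lt_of_mul_lt_mul_left h2 (le_of_lt hk)
        omega
      have key : ∀ c : Int, (∀ y ∈ done, y ≤ c) → c ≤ x →
          budgetAt (done ++ x :: rest) c = done.sum + k * c := by
        intro c hc hcx
        rw [budgetAt_append, budgetAt_eq_sum done hc,
          budgetAt_const (x :: rest) (fun z hz => le_trans hcx (hxr z hz))]
      refine ⟨le_max_left 1 d, ?_, ?_⟩
      · by_cases hge : 1 ≤ d
        · right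
          rw [max_eq_right hge, key d hdoned (by omega)]
          omega
        · left; exact max_eq_left (by omega)
      · have hbase : T < budgetAt (done ++ x :: rest) (d + 1) := by
          rw [key (d + 1) (fun y hy => by have := hdoned y hy; omega) (by omega)]
          omega
        exact lt_of_lt_of_le hbase (budgetAt_mono _ (by omega))
    · rename_i hle
      rw [not_lt] at hle
      have hassoc : (done ++ [x]) ++ rest = done ++ x :: rest := by simp
      have hrec := ih (done ++ [x]) (by rw [hassoc]; exact hs) ?_ (by simp) (by rw [hassoc]; exact htot)
      · rw [hassoc] at hrec
        simpa using hrec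
      · intro y hy
        have hkk : ((x :: rest).length : Int) = (rest.length : Int) + 1 := by
          simp [List.length_cons]
        simp only [List.sum_append, List.sum_cons, List.sum_nil, add_zero]
        rw [hkk] at hle
        rcases List.mem_append.mp hy with hy | hy
        · have hmul : (rest.length : Int) * y ≤ (rest.length : Int) * x :=
            mul_le_mul_of_nonneg_left (hdx y hy) (by positivity)
          nlinarith
        · simp at hy
          subst hy
          nlinarith

theorem pairwise_le_getLast :
    ∀ (s : List Int) (h : s ≠ []), s.Pairwise (· ≤ ·) → ∀ y ∈ s, y ≤ s.getLast h := by
  intro s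
  induction s with
  | nil => intro h; exact absurd rfl h
  | cons a t ih =>
    intro h hp y hy
    rcases t with _ | ⟨b, u⟩
    · simp at hy; simp [hy, List.getLast]
    · have hlast : (a :: b :: u).getLast h = (b :: u).getLast (by simp) := by
        simp [List.getLast]
      rw [hlast]
      rcases List.mem_cons.mp hy with rfl | hy
      · exact le_trans ((List.pairwise_cons.mp hp).1 b (by simp))
          (ih (by simp) (List.pairwise_cons.mp hp).2 b (by simp))
      · exact ih (by simp) (List.pairwise_cons.mp hp).2 y hy

theorem goodCap_A (l : List Int) (T : Int) (hne : l ≠ []) (hgt : ¬ l.sum ≤ T) :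
    GoodCap l T (assignLoop l T 1 ((PySem.List.max? l (fun r => r)).getD 0)) := by
  obtain ⟨m, hm⟩ : ∃ m, PySem.List.max? l (fun r => r) = some m := by
    rcases h : PySem.List.max? l (fun r => r) with _ | m
    · exact absurd ((PySem.List.max?_eq_none_iff l _).mp h) hne
    · exact ⟨m, rfl⟩
  rw [hm]
  refine loop_good l T _ 1 _ le_rfl le_rfl (Or.inl rfl) ?_
  intro c hc
  simp only [Option.getD_some] at hc
  have hmax : budgetAt l m = l.sum := budgetAt_eq_sum l (PySem.List.max?_isMax hm)
  calc T < l.sum := by omega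
    _ = budgetAt l m := hmax.symm
    _ ≤ budgetAt l c := budgetAt_mono l hc

-- ===== VERDICT (by name: the statement is the Claim_ definition above) =====
theorem assign_budget_spec : Claim_equal_assign_budget := by
  intro l T _ hpre
  unfold Spec_assign_budget assign_budget assign_budget_alt
  have hperm : (PySem.List.sorted l (fun r => r)).Perm l := PySem.List.sorted_perm l _ false
  have hsum : (PySem.List.sorted l (fun r => r)).sum = l.sum := hperm.sum_eq
  have hsne : PySem.List.sorted l (fun r => r) ≠ [] := by
    rw [ne_eq, PySem.List.sorted_eq_nil_iff]; exact hpre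
  by_cases hc : l.sum ≤ T
  · rw [if_pos hc, if_pos (by rw [hsum]; exact hc)]
    -- max(l) = (sorted l)[-1]
    obtain ⟨m, hm⟩ : ∃ m, PySem.List.max? l (fun r => r) = some m := by
      rcases h : PySem.List.max? l (fun r => r) with _ | m
      · exact absurd ((PySem.List.max?_eq_none_iff l _).mp h) hpre
      · exact ⟨m, rfl⟩
    rw [hm, PySem.List.pyGet?_neg_one, List.getLast?_eq_some_getLast (h := hsne)]
    simp only [Option.getD_some]
    have hlast_mem := List.getLast_mem hsne
    have hpw := PySem.List.sorted_pairwise l (fun r => r)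
    have h1 : m ≤ (PySem.List.sorted l (fun r => r)).getLast hsne :=
      pairwise_le_getLast _ hsne hpw m (hperm.mem_iff.mpr (PySem.List.max?_mem hm))
    have h2 : (PySem.List.sorted l (fun r => r)).getLast hsne ≤ m :=
      PySem.List.max?_isMax hm _ (hperm.subset hlast_mem)
    omega
  · rw [if_neg hc, if_neg (by rw [hsum]; exact hc)]
    have hA := goodCap_A l T hpre hc
    have hB := scan_good T (PySem.List.sorted l (fun r => r)) [] (by simpa using PySem.List.sorted_pairwise l (fun r => r)) (by simp) (by simpa using hsne) (by simp [hsum]; omega)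
    simp only [List.nil_append, List.sum_nil] at hB
    have hB' : GoodCap l T (altScan T 0 (PySem.List.sorted l (fun r => r))) := by
      obtain ⟨h1, h2, h3⟩ := hB
      exact ⟨h1, by rwa [budgetAt_perm hperm] at h2, by rwa [budgetAt_perm hperm] at h3⟩
    exact goodCap_unique hA hB'
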